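-- pv_equiv track=rewrite | github.com/radifyadika/PurwadhikaSchool | Modul 1 - Programming (Python) Fundamental/Day 7/Purwadhika_Task/Group 4_Day 7.py | rajut
-- ===== SOURCE A (Python) =====
-- def rajut(word):
--     n = 1
--     original_word = ''
--     while n * (n + 1) // 2 <= len(word):
--         n += 1
--     n -= 1
--     for i in range(n):
--         original_word = word[(len(word)-n):]
--     return original_word
-- ===== SOURCE B (Python) =====
-- import math
--
--
-- def rajut(word):
--     L = len(word)
--     n = (math.isqrt(8 * L + 1) - 1) // 2
--     return word[L - n:]
-- ===== Notes on version B (the rewrite author's own statement) =====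
-- stated objective: idiomatic
-- what changed: Replaced the incremental while-loop search for the triangular bound (and the redundant for-loop reassignment) by the closed-form inverse triangular number n = (math.isqrt(8L+1)-1)//2 followed by a single slice.
import Mathlib
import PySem

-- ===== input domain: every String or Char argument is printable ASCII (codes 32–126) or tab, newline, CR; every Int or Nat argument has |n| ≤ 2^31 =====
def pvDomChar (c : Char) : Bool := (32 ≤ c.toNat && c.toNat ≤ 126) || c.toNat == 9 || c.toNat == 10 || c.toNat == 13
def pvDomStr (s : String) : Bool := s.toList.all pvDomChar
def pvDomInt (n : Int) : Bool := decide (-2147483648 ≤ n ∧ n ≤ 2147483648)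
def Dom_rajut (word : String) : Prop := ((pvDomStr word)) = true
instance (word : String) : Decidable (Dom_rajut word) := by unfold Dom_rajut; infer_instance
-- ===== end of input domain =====

-- B replaces A's incremental while-loop search for the triangular bound (and the redundant
-- for-loop reassignment) by the closed-form inverse triangular number via integer square root plus one slice.


-- ===== PORT A =====
-- the while loop: increments n while n*(n+1)//2 <= L (all values stay nonnegative, so Nat arithmetic is exact)
def rajutLoop (L n : Nat) : Nat :=
  if n * (n + 1) / 2 ≤ L then rajutLoop L (n + 1) else n
termination_by L + 1 - n
decreasing_by
  have h2 : n * 2 ≤ n * (n + 1) := by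
    rcases Nat.eq_zero_or_pos n with h | h
    · simp [h]
    · exact Nat.mul_le_mul (le_refl n) (by omega)
  have hp : n ≤ n * (n + 1) / 2 := (Nat.le_div_iff_mul_le (k := 2) (by norm_num)).mpr h2
  omega

def rajut (word : String) : String :=
  let n := rajutLoop (word.toList.length) 1 - 1
  let original_word : String :=
    (PySem.List.pyRange 0 (n : Int) 1).foldl
      (fun _ _ => PySem.Str.slice word (some ((word.toList.length : Int) - (n : Int))) none) ""
  original_word

-- ===== PORT B =====
def rajut_alt (word : String) : String :=
  let L := word.toList.length
  let n := (Nat.sqrt (8 * L + 1) - 1) / 2          -- math.isqrt = Nat.sqrt (args are nonnegative)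
  PySem.Str.slice word (some ((L : Int) - (n : Int))) none

-- ===== PRECONDITION & SPEC =====
def Spec_rajut (word : String) (out : String) : Prop := out = rajut_alt word
instance (word : String) (out : String) : Decidable (Spec_rajut word out) := by unfold Spec_rajut; infer_instance

-- ===== CLAIM (what is proved, stated in full; the proofs are below) =====
def Claim_equal_rajut : Prop := ∀ (word : String), Dom_rajut word → Spec_rajut word (rajut word)

-- ===== LEMMAS AND PROOFS =====

-- loop characterisation: starting from n with (n-1)*n ≤ 2L, the loop returns the r ≥ 1 with r*(r-1) ≤ 2L < r*(r+1)
theorem rajutLoop_spec (L n : Nat) (h1 : 1 ≤ n) (h2 : (n - 1) * n ≤ 2 * L) :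
    1 ≤ rajutLoop L n ∧ (rajutLoop L n - 1) * rajutLoop L n ≤ 2 * L ∧
      2 * L < rajutLoop L n * (rajutLoop L n + 1) := by
  fun_induction rajutLoop L n with
  | case1 n hle ih =>
    obtain ⟨k, hk⟩ : 2 ∣ n * (n + 1) := Nat.even_mul_succ_self n |>.two_dvd
    refine ih (by omega) ?_
    have : n * (n + 1) ≤ 2 * L := by
      set p := n * (n + 1) with hp
      omega
    simpa using this
  | case2 n hgt =>
    refine ⟨h1, h2, ?_⟩
    have h3 : ¬ n * (n + 1) ≤ 2 * L + 1 := by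
      intro hc
      exact hgt ((Nat.div_le_iff_le_mul_add_pred (by norm_num : (0:ℕ) < 2)).mpr (by omega))
    omega

-- B's closed form satisfies the same characterisation
theorem sqrt_form_spec (L : Nat) :
    let g := (Nat.sqrt (8 * L + 1) - 1) / 2
    g * (g + 1) ≤ 2 * L ∧ 2 * L < (g + 1) * (g + 2) := by
  intro g
  have hs1 : Nat.sqrt (8 * L + 1) * Nat.sqrt (8 * L + 1) ≤ 8 * L + 1 := Nat.sqrt_le ..
  have hs2 : 8 * L + 1 < (Nat.sqrt (8 * L + 1) + 1) * (Nat.sqrt (8 * L + 1) + 1) :=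
    Nat.lt_succ_sqrt ..
  have hs0 : 1 ≤ Nat.sqrt (8 * L + 1) := by
    rcases Nat.eq_zero_or_pos (Nat.sqrt (8 * L + 1)) with h | h
    · rw [h] at hs2; omega
    · exact h
  set s := Nat.sqrt (8 * L + 1) with hsdef
  have hg : 2 * g + 1 ≤ s ∧ s ≤ 2 * g + 2 := by
    constructor <;> omega
  constructor
  · nlinarith [hg.1, hs1]
  · nlinarith [hg.2, hs2]

-- uniqueness of the bracketed value
theorem tri_unique (L a b : Nat) (ha : a * (a + 1) ≤ 2 * L ∧ 2 * L < (a + 1) * (a + 2))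
    (hb : b * (b + 1) ≤ 2 * L ∧ 2 * L < (b + 1) * (b + 2)) : a = b := by
  by_contra hne
  rcases Nat.lt_or_ge a b with h | h
  · have : (a + 1) * (a + 2) ≤ b * (b + 1) := by
      have h1 : a + 1 ≤ b := h
      exact Nat.mul_le_mul (by omega) (by omega)
    omega
  · have hlt : b < a := lt_of_le_of_ne h (fun he => hne he.symm)
    have : (b + 1) * (b + 2) ≤ a * (a + 1) := Nat.mul_le_mul (by omega) (by omega)
    omega

theorem n_eq (L : Nat) : rajutLoop L 1 - 1 = (Nat.sqrt (8 * L + 1) - 1) / 2 := by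
  obtain ⟨h1, h2, h3⟩ := rajutLoop_spec L 1 (by omega) (by omega)
  have hb := sqrt_form_spec L
  set r := rajutLoop L 1 with hr
  set g := (Nat.sqrt (8 * L + 1) - 1) / 2 with hg
  have : r - 1 = g := by
    apply tri_unique L
    · constructor
      · calc (r - 1) * (r - 1 + 1) = (r - 1) * r := by congr 1; omega
          _ ≤ 2 * L := h2
      · calc 2 * L < r * (r + 1) := h3
          _ = (r - 1 + 1) * (r - 1 + 2) := by congr 1 <;> omega
    · exact hb
  exact this

theorem foldl_const_range (n : Nat) (c : String) (hn : 1 ≤ n) :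
    (PySem.List.pyRange 0 (n : Int) 1).foldl (fun _ _ => c) "" = c := by
  have hne : PySem.List.pyRange 0 (n : Int) 1 ≠ [] := by
    have hlen : (PySem.List.pyRange 0 (n : Int) 1).length = n := by
      simp [PySem.List.length_pyRange_one]
    intro hnil; rw [hnil] at hlen; simp at hlen; omega
  obtain ⟨x, xs, hx⟩ := List.exists_cons_of_ne_nil hne
  rw [hx]
  clear hx
  induction xs generalizing x with
  | nil => simp
  | cons y ys ih => simpa using ih y

-- ===== VERDICT (by name: the statement is the Claim_ definition above) =====
theorem rajut_spec : Claim_equal_rajut := by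
  intro word _
  unfold Spec_rajut rajut rajut_alt
  simp only []
  rw [n_eq]
  set L := word.toList.length with hL
  set g := (Nat.sqrt (8 * L + 1) - 1) / 2 with hg
  rcases Nat.eq_zero_or_pos g with h0 | hpos
  · -- g = 0 forces L = 0, so the empty fold and the full slice are both the empty string
    have hb := sqrt_form_spec L
    rw [← hg] at hb
    have hL0 : L = 0 := by
      rcases hb with ⟨_, h2⟩
      rw [h0] at h2
      omega
    rw [h0, hL0]
    have hword : word = "" := by
      have hnil : word.toList = [] := List.length_eq_zero_iff.mp hL0
      exact String.toList_inj.mp (hnil.trans (rfl : ("" : String).toList = []).symm)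
    subst hword
    decide
  · rw [foldl_const_range g _ hpos]
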